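-- pv_equiv track=rewrite | github.com/Regnm0ln1/Themer | color-distance.py | MeanOfGroup
-- ===== SOURCE A (Python) =====
-- def MeanOfGroup(color_group: list) -> dict:
--     colors = {}
--     for color in color_group:
--         if color not in colors.keys():
--             colors[color] = 1
--         else:
--             colors[color] += 1
--
--     return dict(sorted(colors.items(), key=lambda item: item[1], reverse=True), length=len(color_group))
-- ===== SOURCE B (Python) =====
-- def MeanOfGroup(color_group: list) -> dict:
--     counts = {}
--     for color in color_group:
--         counts[color] = counts.get(color, 0) + 1
--     mx = max(counts.values(), default=0)
--     buckets = {}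
--     for pair in counts.items():
--         buckets.setdefault(pair[1], []).append(pair)
--     items = []
--     for c in range(mx, 0, -1):
--         items.extend(buckets.get(c, []))
--     return dict(items, length=len(color_group))
-- ===== Notes on version B (the rewrite author's own statement) =====
-- stated objective: faster
-- what changed: Replaces the comparison sort of the frequency items by a counting/bucket pass: items are grouped into buckets keyed by their count and emitted from the maximum count down in dict insertion order, which reproduces the stable descending sort exactly.
import Mathlib
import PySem

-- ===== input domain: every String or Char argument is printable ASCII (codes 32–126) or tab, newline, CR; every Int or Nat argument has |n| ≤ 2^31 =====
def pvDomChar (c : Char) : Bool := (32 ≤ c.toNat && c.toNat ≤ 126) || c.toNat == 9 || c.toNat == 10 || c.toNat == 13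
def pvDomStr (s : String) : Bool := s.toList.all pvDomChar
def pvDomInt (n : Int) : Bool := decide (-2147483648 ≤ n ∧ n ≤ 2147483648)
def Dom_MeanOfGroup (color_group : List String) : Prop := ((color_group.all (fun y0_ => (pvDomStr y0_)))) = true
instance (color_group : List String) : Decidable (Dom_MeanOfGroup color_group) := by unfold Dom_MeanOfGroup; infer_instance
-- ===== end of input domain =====

-- B replaces the comparison sort of A by a counting/bucket pass over the frequency dict
-- (buckets scanned from the maximum count down in insertion order, which reproduces the
-- stable descending sort exactly); equivalence is about the RETURN value (neither mutates).

-- ===== PORT A =====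
def MeanOfGroup (color_group : List String) : List (String × Int) :=
  let colors : PySem.Dict String Int :=
    color_group.foldl
      (fun d color =>
        if ¬ (d.contains color) then d.insert color 1
        else d.insert color (d.getD color 0 + 1))
      PySem.Dict.empty
  let sortedItems := PySem.List.sorted colors.items (fun item => item.2) true
  ((PySem.Dict.ofList sortedItems).insert "length" (color_group.length : Int)).items

-- ===== PORT B =====
def MeanOfGroup_alt (color_group : List String) : List (String × Int) :=
  let counts : PySem.Dict String Int :=
    color_group.foldl (fun d color => d.insert color (d.getD color 0 + 1)) PySem.Dict.empty
  let mx : Int := PySem.List.maxD counts.values (fun v => v) 0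
  let buckets : PySem.Dict Int (List (String × Int)) :=
    counts.items.foldl (fun d pair => d.modify pair.2 [] (· ++ [pair])) PySem.Dict.empty
  let items :=
    (PySem.List.pyRange mx 0 (-1)).foldl (fun acc c => acc ++ buckets.getD c []) []
  ((PySem.Dict.ofList items).insert "length" (color_group.length : Int)).items

-- ===== PRECONDITION & SPEC =====
def Spec_MeanOfGroup (color_group : List String) (out : List (String × Int)) : Prop := out = MeanOfGroup_alt color_group
instance (color_group : List String) (out : List (String × Int)) : Decidable (Spec_MeanOfGroup color_group out) := by unfold Spec_MeanOfGroup; infer_instance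

-- ===== CLAIM (what is proved, stated in full; the proofs are below) =====
def Claim_equal_MeanOfGroup : Prop := ∀ (color_group : List String), Dom_MeanOfGroup color_group → Spec_MeanOfGroup color_group (MeanOfGroup color_group)

-- ===== LEMMAS AND PROOFS =====

theorem insertBy_cons {α : Type} (b : α → α → Bool) (x y : α) (ys : List α) :
    PySem.List.insertBy b x (y :: ys) =
      if b x y then x :: y :: ys else y :: PySem.List.insertBy b x ys := rfl

-- insertBy walks past a prefix it does not go before
theorem insertBy_skip {α : Type} (b : α → α → Bool) (x : α) (ys1 ys2 : List α)
    (h : ∀ y ∈ ys1, b x y = false) :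
    PySem.List.insertBy b x (ys1 ++ ys2) = ys1 ++ PySem.List.insertBy b x ys2 := by
  induction ys1 with
  | nil => simp
  | cons y t ih =>
    have hy : b x y = false := h y (by simp)
    simp [insertBy_cons, hy, ih (fun z hz => h z (by simp [hz]))]

-- insertBy goes to the front when it goes before everything
theorem insertBy_front {α : Type} (b : α → α → Bool) (x : α) (ys : List α)
    (h : ∀ y ∈ ys, b x y = true) :
    PySem.List.insertBy b x ys = x :: ys := by
  cases ys with
  | nil => rfl
  | cons y t => simp [insertBy_cons, h y (by simp)]

-- inserting x into the bucket decomposition puts it at the end of its own bucket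
theorem insertBy_flatMap {α : Type} (key : α → Int) (x : α) :
    ∀ (cs : List Int), cs.Pairwise (· > ·) → key x ∈ cs → ∀ (l : List α),
    PySem.List.insertBy (fun a b => decide (key b < key a)) x
        (cs.flatMap (fun c => l.filter (fun y => key y == c))) =
      cs.flatMap (fun c => (l ++ [x]).filter (fun y => key y == c)) := by
  intro cs
  induction cs with
  | nil => intro _ hx; exact absurd hx (by simp)
  | cons c cs' ih =>
    intro hp hx l
    have hgt : ∀ c' ∈ cs', c > c' := (List.pairwise_cons.mp hp).1
    have hp' : cs'.Pairwise (· > ·) := (List.pairwise_cons.mp hp).2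
    by_cases hxc : key x = c
    · -- x belongs to the head bucket: skip it, then insert in front of the rest
      have hskip : ∀ y ∈ l.filter (fun y => key y == c),
          (fun a b => decide (key b < key a)) x y = false := by
        intro y hy
        have : key y = c := by simpa using (List.mem_filter.mp hy).2
        simp [this, hxc]
      have hfront : ∀ y ∈ cs'.flatMap (fun c' => l.filter (fun z => key z == c')),
          (fun a b => decide (key b < key a)) x y = true := by
        intro y hy
        rcases List.mem_flatMap.mp hy with ⟨c', hc', hy'⟩
        have : key y = c' := by simpa using (List.mem_filter.mp hy').2
        have := hgt c' hc'
        simp [‹key y = c'›, hxc]; omega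
      have htail : ∀ c' ∈ cs', (l ++ [x]).filter (fun y => key y == c') =
          l.filter (fun y => key y == c') := by
        intro c' hc'
        have : key x ≠ c' := by have := hgt c' hc'; omega
        simp [List.filter_append, this]
      calc PySem.List.insertBy (fun a b => decide (key b < key a)) x
            ((c :: cs').flatMap (fun c' => l.filter (fun y => key y == c')))
          = l.filter (fun y => key y == c) ++
              PySem.List.insertBy (fun a b => decide (key b < key a)) x
                (cs'.flatMap (fun c' => l.filter (fun z => key z == c'))) := by
            rw [List.flatMap_cons]; exact insertBy_skip _ _ _ _ hskip
        _ = l.filter (fun y => key y == c) ++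
              (x :: cs'.flatMap (fun c' => l.filter (fun z => key z == c'))) := by
            rw [insertBy_front _ _ _ hfront]
        _ = (c :: cs').flatMap (fun c' => (l ++ [x]).filter (fun y => key y == c')) := by
            rw [List.flatMap_cons]
            have hhead : (l ++ [x]).filter (fun y => key y == c)
                = l.filter (fun y => key y == c) ++ [x] := by
              simp [List.filter_append, hxc]
            rw [hhead]
            have : cs'.flatMap (fun c' => (l ++ [x]).filter (fun y => key y == c'))
                = cs'.flatMap (fun c' => l.filter (fun y => key y == c')) := by
              unfold List.flatMap
              exact congrArg List.flatten (List.map_congr_left htail)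
            rw [this]; simp
    · -- x belongs to a later bucket: skip the head bucket and recurse
      have hx' : key x ∈ cs' := by rcases List.mem_cons.mp hx with h | h; exact absurd h hxc; exact h
      have hlt : key x < c := hgt _ hx'
      have hskip : ∀ y ∈ l.filter (fun y => key y == c),
          (fun a b => decide (key b < key a)) x y = false := by
        intro y hy
        have : key y = c := by simpa using (List.mem_filter.mp hy).2
        simp [this]; omega
      rw [List.flatMap_cons, insertBy_skip _ _ _ _ hskip, ih hp' hx' l, List.flatMap_cons]
      have : (l ++ [x]).filter (fun y => key y == c) = l.filter (fun y => key y == c) := by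
        simp [List.filter_append, hxc]
      rw [this]

-- the stable reverse sort by an Int key IS the bucket decomposition along any
-- strictly decreasing list of candidate keys covering all keys present
theorem sorted_rev_eq_flatMap_filter {α : Type} (key : α → Int) (cs : List Int)
    (hcs : cs.Pairwise (· > ·)) :
    ∀ (l : List α), (∀ x ∈ l, key x ∈ cs) →
    PySem.List.sorted l key true = cs.flatMap (fun c => l.filter (fun y => key y == c)) := by
  intro l
  induction l using List.reverseRecOn with
  | nil => intro _; simp [PySem.List.sorted_rev_eq_foldl_insertBy]
  | append_singleton l x ih =>
    intro hmem
    rw [PySem.List.sorted_rev_eq_foldl_insertBy, List.foldl_append,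
        ← PySem.List.sorted_rev_eq_foldl_insertBy, List.foldl_cons, List.foldl_nil,
        ih (fun y hy => hmem y (by simp [hy]))]
    exact insertBy_flatMap key x cs hcs (hmem x (by simp)) l

-- range(mx, 0, -1) is [mx, mx-1, …, 1]
theorem pyRange_down (m : Int) :
    PySem.List.pyRange m 0 (-1) = (List.range m.toNat).map (fun k : Nat => m - (k : Int)) := by
  unfold PySem.List.pyRange
  by_cases hm : 0 < m
  · have h2 : ¬ (0:Int) < -1 := by norm_num
    have h3 : (m - 0 + -(-1) - 1) / -(-1) = m := by norm_num
    simp only [if_neg (by norm_num : ¬ ((-1:Int) = 0)), h2, if_false, if_pos hm, h3]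
    apply List.map_congr_left
    intro k _
    ring
  · have h0 : m.toNat = 0 := by omega
    simp [h0, hm]

theorem mem_pyRange_down {m v : Int} :
    v ∈ PySem.List.pyRange m 0 (-1) ↔ 1 ≤ v ∧ v ≤ m := by
  rw [pyRange_down]
  simp only [List.mem_map, List.mem_range]
  constructor
  · rintro ⟨k, hk, rfl⟩; omega
  · intro ⟨h1, h2⟩; exact ⟨(m - v).toNat, by omega, by omega⟩

theorem pairwise_pyRange_down (m : Int) :
    (PySem.List.pyRange m 0 (-1)).Pairwise (· > ·) := by
  rw [pyRange_down]
  refine List.pairwise_map.mpr (List.Pairwise.imp ?_ (List.pairwise_lt_range (n := m.toNat)))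
  intro a b h
  omega

-- A's counting loop and B's counting loop build the same dict: Counter(color_group)
theorem countA_eq_counter (xs : List String) :
    xs.foldl
      (fun d color =>
        if ¬ (d.contains color) then d.insert color 1
        else d.insert color (d.getD color 0 + 1))
      PySem.Dict.empty = PySem.Dict.counter xs := by
  rw [← PySem.Dict.foldl_insert_getD_add_one_eq_counter]
  apply PySem.List.foldl_congr_mem
  intro d c _
  by_cases h : d.contains c
  · simp [h]
  · have h0 : d.contains c = false := by simpa using h
    simp [h, PySem.Dict.getD_of_not_contains d 0 h0]

theorem countB_eq_counter (xs : List String) :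
    xs.foldl (fun d color => d.insert color (d.getD color 0 + 1)) PySem.Dict.empty
      = PySem.Dict.counter xs :=
  PySem.Dict.foldl_insert_getD_add_one_eq_counter xs

-- B's bucket dict looked up at c is the filter of the items with count c
theorem bucket_getD (items : List (String × Int)) (c : Int) :
    (items.foldl (fun d pair => d.modify pair.2 [] (· ++ [pair])) PySem.Dict.empty).getD c []
      = items.filter (fun p => p.2 == c) := by
  have h1 : items.foldl (fun d pair => d.modify pair.2 [] (· ++ [pair])) PySem.Dict.empty
      = (items.map (fun p => (p.2, p))).foldl
          (fun d q => d.modify q.1 [] (· ++ [q.2])) PySem.Dict.empty := by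
    rw [List.foldl_map]
  rw [h1, PySem.Dict.getD_foldl_modify_append, List.filter_map]
  simp [Function.comp_def]

theorem MeanOfGroup_eq_alt (xs : List String) : MeanOfGroup xs = MeanOfGroup_alt xs := by
  simp only [MeanOfGroup, MeanOfGroup_alt]
  rw [countA_eq_counter, countB_eq_counter]
  set cnt := PySem.Dict.counter xs with hcnt
  set mx : Int := PySem.List.maxD cnt.values (fun v => v) 0 with hmx
  -- every count is ≥ 1 and ≤ mx
  have hbound : ∀ p ∈ cnt.items, 1 ≤ p.2 ∧ p.2 ≤ mx := by
    intro p hp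
    have hval : p.2 ∈ cnt.values := by
      simp only [PySem.Dict.values]
      exact List.mem_map.mpr ⟨p, hp, rfl⟩
    have hpos : 1 ≤ p.2 := by
      rw [hcnt, PySem.Dict.items_counter] at hp
      rcases List.mem_map.mp hp with ⟨k, hk, hkp⟩
      have hkxs : k ∈ xs := (PySem.Set.mem_ofList _ _).mp hk
      have hc := List.count_pos_iff.mpr hkxs
      rw [← hkp]
      simp
      omega
    refine ⟨hpos, ?_⟩
    rcases hv : PySem.List.max? cnt.values (fun v => v) with _ | m
    · exfalso
      have hnil : cnt.values = [] := (PySem.List.max?_eq_none_iff _ _).mp hv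
      rw [hnil] at hval
      simp at hval
    · have hle := PySem.List.max?_isMax hv p.2 hval
      have hmxm : mx = m := by rw [hmx]; simp [PySem.List.maxD, hv]
      omega
  -- B's item list is the bucket decomposition, which is A's stable reverse sort
  have hb : (PySem.List.pyRange mx 0 (-1)).foldl
      (fun acc c => acc ++ (cnt.items.foldl
        (fun d pair => d.modify pair.2 [] (· ++ [pair])) PySem.Dict.empty).getD c []) []
      = PySem.List.sorted cnt.items (fun item => item.2) true := by
    rw [PySem.List.foldl_append_eq_flatMap, List.nil_append]
    rw [sorted_rev_eq_flatMap_filter (fun p => p.2) (PySem.List.pyRange mx 0 (-1))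
          (pairwise_pyRange_down mx) cnt.items
          (fun p hp => mem_pyRange_down.mpr (hbound p hp))]
    unfold List.flatMap
    exact congrArg List.flatten
      (List.map_congr_left (fun c _ => bucket_getD cnt.items c))
  rw [hb]

-- ===== VERDICT (by name: the statement is the Claim_ definition above) =====
theorem MeanOfGroup_spec : Claim_equal_MeanOfGroup := by
  intro xs _
  unfold Spec_MeanOfGroup
  exact MeanOfGroup_eq_alt xs
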